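-- pv_equiv track=rewrite | github.com/SubhPB/leet-code | src/app/2025/contests/C168.py | maxSumOfSquares
-- ===== SOURCE A (Python) =====
-- def maxSumOfSquares(num:int,sum:int)->str:
--     if sum>9*num: return ""
--     res=[]
--     while sum:
--         d=min(sum,9)
--         q=sum//d; sum%=d
--         for i in range(q): res.append(str(d))
--
--     return ''.join(res)+''.join(["0"]*max(0,num-len(res)))
-- ===== SOURCE B (Python) =====
-- def maxSumOfSquares(num: int, sum: int) -> str:
--     if sum > 9 * num or sum < 0:
--         return ""
--     # position i of the answer carries digit clamp(sum - 9*i, 0, 9): a per-position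
--     # closed form over the num output slots, no quotient/remainder extraction at all.
--     return ''.join(chr(ord('0') + min(9, max(0, sum - 9 * i))) for i in range(num))
-- ===== Notes on version B (the rewrite author's own statement) =====
-- stated objective: alternative
-- what changed: A extracts digits by repeated quotient/remainder of min(sum,9) in a while-loop and then pads; B never divides at all: it maps over the num output positions and computes each digit directly by the closed form clamp(sum-9*i, 0, 9).
-- intended difference: On sum < 0 with sum <= 9*num, A returns a nonsense string built from str(sum) itself padded with zeros (e.g. maxSumOfSquares(1,-5) == '-5'), while B returns '' — the intended 'impossible' sentinel, since no digit string can have a negative digit sum. — e.g. on maxSumOfSquares(1, -5): A returns "-5", B returns ""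
import Mathlib
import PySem

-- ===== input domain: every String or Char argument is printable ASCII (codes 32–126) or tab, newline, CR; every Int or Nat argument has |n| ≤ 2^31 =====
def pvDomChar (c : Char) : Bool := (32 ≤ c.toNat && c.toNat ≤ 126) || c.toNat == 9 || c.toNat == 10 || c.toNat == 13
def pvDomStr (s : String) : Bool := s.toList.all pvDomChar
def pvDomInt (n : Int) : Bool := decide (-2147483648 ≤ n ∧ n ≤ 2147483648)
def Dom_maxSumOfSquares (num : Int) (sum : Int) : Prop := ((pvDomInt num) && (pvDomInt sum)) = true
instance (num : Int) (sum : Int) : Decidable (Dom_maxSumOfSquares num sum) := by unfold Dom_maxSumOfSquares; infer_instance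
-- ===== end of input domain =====

-- B replaces A's while-loop quotient/remainder digit extraction by a per-position
-- closed form: output slot i carries digit clamp(sum-9*i, 0, 9) (objective: alternative);
-- on negative `sum` (with sum ≤ 9*num) A returns a nonsense digit string built from
-- str(sum) itself, while B returns "" (see D_ below).


-- ===== PORT A =====
-- termination helper for A's while-loop (one Python iteration strictly shrinks |sum|)
theorem pvModMinShrink (s : Int) (hs : ¬ s = 0) :
    (PySem.Int.mod s (min s 9)).natAbs < s.natAbs := by
  rcases lt_or_gt_of_ne hs with hneg | hpos
  · have hm : min s 9 = s := min_eq_left (by omega)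
    have h1 : PySem.Int.mod (-(-s)) (-(-s)) = -PySem.Int.mod (-s) (-s) :=
      PySem.Int.mod_neg_neg (-s) (-s)
    have h2 : PySem.Int.mod (-s) (-s) = (-s) % (-s) :=
      PySem.Int.mod_eq_emod_of_pos (by omega)
    have h3 : (-s) % (-s) = 0 := Int.emod_self
    simp only [neg_neg] at h1
    rw [hm, h1, h2, h3]
    omega
  · have hd : 0 < min s 9 := lt_min hpos (by norm_num)
    rw [PySem.Int.mod_eq_emod_of_pos hd]
    have h1 := Int.emod_nonneg s (ne_of_gt hd)
    have h2 := Int.emod_lt_of_pos s hd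
    have h3 : min s 9 ≤ s := min_le_left _ _
    omega

-- the `while sum:` loop of A, carrying (sum, res)
def pvALoop (s : Int) (res : List String) : List String :=
  if _h : s = 0 then res
  else
    let d := min s 9
    let q := PySem.Int.floordiv s d
    pvALoop (PySem.Int.mod s d) (res ++ List.replicate q.toNat (PySem.Int.toStr d))
termination_by s.natAbs
decreasing_by exact pvModMinShrink s _h

def maxSumOfSquares (num : Int) (sum : Int) : String :=
  if sum > 9 * num then ""
  else
    let res := pvALoop sum []
    String.join res ++
      String.join (List.replicate (max 0 (num - PySem.List.len res)).toNat "0")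

-- ===== PORT B =====
def maxSumOfSquares_alt (num : Int) (sum : Int) : String :=
  if sum > 9 * num ∨ sum < 0 then ""
  else
    -- ''.join(chr(ord('0') + min(9, max(0, sum - 9*i))) for i in range(num))
    String.ofList ((PySem.List.pyRange 0 num 1).map
      (fun i => Char.ofNat (('0'.toNat : Int) + min 9 (max 0 (sum - 9 * i))).toNat))

-- ===== PRECONDITION & SPEC =====
-- On inputs with sum < 0 and sum ≤ 9*num, A appends str(sum) itself (a multi-character
-- token such as "-5") and pads by item count, returning e.g. "-5"; B returns "", the
-- intended 'impossible' sentinel, since no digit string has a negative digit sum.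
def D_maxSumOfSquares (num : Int) (sum : Int) : Prop := sum < 0 ∧ sum ≤ 9 * num
instance (num : Int) (sum : Int) : Decidable (D_maxSumOfSquares num sum) := by
  unfold D_maxSumOfSquares; infer_instance

def Spec_maxSumOfSquares (num : Int) (sum : Int) (out : String) : Prop :=
  ¬ D_maxSumOfSquares num sum → out = maxSumOfSquares_alt num sum
instance (num : Int) (sum : Int) (out : String) : Decidable (Spec_maxSumOfSquares num sum out) := by
  unfold Spec_maxSumOfSquares; infer_instance

def pvDiffWitness_maxSumOfSquares : Int × Int := (1, -5)
def pvDiffWitnessOut_maxSumOfSquares : String × String := ("-5", "")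

-- ===== CLAIM (what is proved, stated in full; the proofs are below) =====
def Claim_unchanged_maxSumOfSquares : Prop := ∀ (num : Int) (sum : Int), Dom_maxSumOfSquares num sum → Spec_maxSumOfSquares num sum (maxSumOfSquares num sum)
def Claim_changed_maxSumOfSquares : Prop := Dom_maxSumOfSquares (pvDiffWitness_maxSumOfSquares.1) (pvDiffWitness_maxSumOfSquares.2) ∧ D_maxSumOfSquares (pvDiffWitness_maxSumOfSquares.1) (pvDiffWitness_maxSumOfSquares.2) ∧ maxSumOfSquares (pvDiffWitness_maxSumOfSquares.1) (pvDiffWitness_maxSumOfSquares.2) = pvDiffWitnessOut_maxSumOfSquares.1 ∧ maxSumOfSquares_alt (pvDiffWitness_maxSumOfSquares.1) (pvDiffWitness_maxSumOfSquares.2) = pvDiffWitnessOut_maxSumOfSquares.2 ∧ pvDiffWitnessOut_maxSumOfSquares.1 ≠ pvDiffWitnessOut_maxSumOfSquares.2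
def Claim_exact_maxSumOfSquares : Prop := ∀ (num : Int) (sum : Int), Dom_maxSumOfSquares num sum → D_maxSumOfSquares num sum → maxSumOfSquares num sum ≠ maxSumOfSquares_alt num sum

-- ===== LEMMAS AND PROOFS =====
theorem pvALoop_small (s : Int) (h0 : 0 ≤ s) (h9 : s < 9) (res : List String) :
    pvALoop s res = res ++ (if s = 0 then [] else [PySem.Int.toStr s]) := by
  by_cases hz : s = 0
  · subst hz; rw [pvALoop]; simp
  · rw [pvALoop]
    rw [dif_neg hz]
    have hmin : min s 9 = s := min_eq_left (by omega)
    have hdiv : PySem.Int.floordiv s s = 1 := by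
      rw [PySem.Int.floordiv_eq_ediv_of_pos (by omega)]
      exact Int.ediv_self hz
    have hmod : PySem.Int.mod s s = 0 := by
      rw [PySem.Int.mod_eq_emod_of_pos (by omega)]
      exact Int.emod_self
    simp only [hmin, hdiv, hmod]
    rw [pvALoop]
    simp [hz]

theorem pvALoop_formula (s : Int) (hs : 0 ≤ s) (res : List String) :
    pvALoop s res = res ++ List.replicate (PySem.Int.floordiv s 9).toNat "9" ++
      (if PySem.Int.mod s 9 = 0 then [] else [PySem.Int.toStr (PySem.Int.mod s 9)]) := by
  by_cases h : s < 9
  · have hdiv : PySem.Int.floordiv s 9 = 0 := by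
      rw [PySem.Int.floordiv_eq_ediv_of_pos (by norm_num)]
      exact Int.ediv_eq_zero_of_lt hs h
    have hmod : PySem.Int.mod s 9 = s := by
      rw [PySem.Int.mod_eq_emod_of_pos (by norm_num)]
      exact Int.emod_eq_of_lt hs h
    rw [pvALoop_small s hs h res, hdiv, hmod]
    simp only [Int.toNat_zero, List.replicate_zero, List.append_nil]
  · rw [not_lt] at h
    rw [pvALoop]
    rw [dif_neg (by omega : ¬ s = 0)]
    have hmin : min s 9 = 9 := min_eq_right (by omega)
    have hr0 : 0 ≤ PySem.Int.mod s 9 := by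
      rw [PySem.Int.mod_eq_emod_of_pos (by norm_num)]
      exact Int.emod_nonneg s (by norm_num)
    have hr9 : PySem.Int.mod s 9 < 9 := by
      rw [PySem.Int.mod_eq_emod_of_pos (by norm_num)]
      exact Int.emod_lt_of_pos s (by norm_num)
    simp only [hmin]
    rw [pvALoop_small _ hr0 hr9]
    have h9 : PySem.Int.toStr 9 = "9" := by decide
    simp [h9, List.append_assoc]

theorem pvNineToList : ("9" : String).toList = ['9'] := by decide
theorem pvZeroToList : ("0" : String).toList = ['0'] := by decide

theorem pvToCharsDigit (r : Int) (h0 : 0 < r) (h9 : r < 9) :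
    PySem.Int.toChars r = [Char.ofNat (48 + r.toNat)] := by
  interval_cases r <;> decide

-- the list-level core, r = 0 branch: A's nines+padding equal B's per-position closed form
theorem pvCoreZero (num s : Int) (a b : Nat) (h0 : 0 ≤ s) (hle : s ≤ 9 * num)
    (hz : s % 9 = 0) (ha : (a : Int) = s / 9) (hb : (b : Int) = max 0 (num - max (s / 9) 0)) :
    List.replicate a '9' ++ List.replicate b '0'
    = List.map ((fun i => Char.ofNat (48 + min 9 (max 0 (s - 9 * i))).toNat) ∘ fun (k : Nat) => (k : Int))
        (List.range num.toNat) := by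
  apply List.ext_getElem
  · simp only [List.length_append, List.length_replicate, List.length_map, List.length_range]
    omega
  · intro i hiL hiR
    simp only [List.length_append, List.length_replicate] at hiL
    rw [List.getElem_map, List.getElem_range]
    simp only [Function.comp, List.getElem_append, List.length_replicate, List.getElem_replicate]
    split_ifs with h1
    · have : (48 + min 9 (max 0 (s - 9 * (i : Int)))).toNat = 57 := by omega
      rw [this]
    · have : (48 + min 9 (max 0 (s - 9 * (i : Int)))).toNat = 48 := by omega
      rw [this]

-- r ≠ 0 branch: nines, the remainder digit, padding
theorem pvCorePos (num s : Int) (a b : Nat) (_h0 : 0 ≤ s) (hle : s ≤ 9 * num)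
    (hz : ¬ s % 9 = 0) (ha : (a : Int) = s / 9) (hb : (b : Int) = max 0 (num - (max (s / 9) 0 + 1))) :
    List.replicate a '9' ++ Char.ofNat (48 + (s % 9).toNat) :: List.replicate b '0'
    = List.map ((fun i => Char.ofNat (48 + min 9 (max 0 (s - 9 * i))).toNat) ∘ fun (k : Nat) => (k : Int))
        (List.range num.toNat) := by
  have hr0 : 0 ≤ s % 9 := Int.emod_nonneg s (by norm_num)
  have hr9 : s % 9 < 9 := Int.emod_lt_of_pos s (by norm_num)
  apply List.ext_getElem
  · simp only [List.length_append, List.length_replicate, List.length_map, List.length_range,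
      List.length_cons]
    omega
  · intro i hiL hiR
    simp only [List.length_append, List.length_replicate, List.length_cons] at hiL
    rw [List.getElem_map, List.getElem_range]
    simp only [Function.comp, List.getElem_append, List.length_replicate, List.getElem_replicate,
      List.getElem_cons]
    split_ifs with h1 h2
    · have : (48 + min 9 (max 0 (s - 9 * (i : Int)))).toNat = 57 := by omega
      rw [this]
    · -- i = a: the remainder digit
      have : (48 + min 9 (max 0 (s - 9 * (i : Int)))).toNat = 48 + (s % 9).toNat := by omega
      rw [this]
    · have : (48 + min 9 (max 0 (s - 9 * (i : Int)))).toNat = 48 := by omega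
      rw [this]

theorem pvEquivNonneg (num : Int) (sum : Int) (h0 : 0 ≤ sum) (hle : sum ≤ 9 * num) :
    maxSumOfSquares num sum = maxSumOfSquares_alt num sum := by
  have hfd : PySem.Int.floordiv sum 9 = sum / 9 :=
    PySem.Int.floordiv_eq_ediv_of_pos (by norm_num)
  have hmd : PySem.Int.mod sum 9 = sum % 9 :=
    PySem.Int.mod_eq_emod_of_pos (by norm_num)
  have hr0 : 0 ≤ sum % 9 := Int.emod_nonneg sum (by norm_num)
  have hr9 : sum % 9 < 9 := Int.emod_lt_of_pos sum (by norm_num)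
  unfold maxSumOfSquares maxSumOfSquares_alt
  rw [if_neg (by omega), if_neg (by omega)]
  simp only [pvALoop_formula sum h0 [], List.nil_append, hfd, hmd]
  apply String.toList_inj.mp
  rw [PySem.List.pyRange_one]
  by_cases hz : sum % 9 = 0
  · rw [if_pos hz]
    simp [String.join_eq, List.map_replicate, pvNineToList, pvZeroToList,
      PySem.List.len_eq, String.toList_ofList]
    exact pvCoreZero num sum (sum / 9).toNat (max 0 (num - max (sum / 9) 0)).toNat
      h0 hle hz (by omega) (by omega)
  · have hrl : PySem.Int.toStr (sum % 9) = String.ofList [Char.ofNat (48 + (sum % 9).toNat)] := by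
      have hc := pvToCharsDigit (sum % 9) (by omega) hr9
      rw [← PySem.Int.toList_toStr] at hc
      apply String.toList_inj.mp
      rw [hc, String.toList_ofList]
    rw [if_neg hz]
    simp [String.join_eq, List.map_replicate, pvNineToList, pvZeroToList, hrl,
      PySem.List.len_eq, String.toList_ofList]
    exact pvCorePos num sum (sum / 9).toNat (max 0 (num - (max (sum / 9) 0 + 1))).toNat
      h0 hle hz (by omega) (by omega)

-- one iteration of A's loop on negative sum: it appends str(sum) itself and stops
theorem pvALoopNeg (s : Int) (hs : s < 0) (res : List String) :
    pvALoop s res = res ++ [PySem.Int.toStr s] := by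
  rw [pvALoop, dif_neg (by omega : ¬ s = 0)]
  have hmin : min s 9 = s := min_eq_left (by omega)
  have hdiv : PySem.Int.floordiv s s = 1 := by
    have h := PySem.Int.floordiv_neg_neg (-s) (-s)
    simp only [neg_neg] at h
    rw [h, PySem.Int.floordiv_eq_ediv_of_pos (by omega : (0:Int) < -s)]
    exact Int.ediv_self (by omega)
  have hmod : PySem.Int.mod s s = 0 := by
    have h := PySem.Int.mod_neg_neg (-s) (-s)
    simp only [neg_neg] at h
    rw [h, PySem.Int.mod_eq_emod_of_pos (by omega : (0:Int) < -s)]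
    simp
  simp only [hmin, hdiv, hmod]
  rw [pvALoop]
  simp

-- ===== VERDICT (by name: the statement is the Claim_ definition above) =====
theorem maxSumOfSquares_spec : Claim_unchanged_maxSumOfSquares := by
  intro num sum _ hD
  unfold D_maxSumOfSquares at hD
  by_cases hg : sum > 9 * num
  · show maxSumOfSquares num sum = maxSumOfSquares_alt num sum
    unfold maxSumOfSquares maxSumOfSquares_alt
    rw [if_pos hg, if_pos (Or.inl hg)]
  · exact pvEquivNonneg num sum (by omega) (by omega)

theorem maxSumOfSquares_changed : Claim_changed_maxSumOfSquares := by
  unfold Claim_changed_maxSumOfSquares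
  refine ⟨by decide, by decide, ?_, by decide, by decide⟩
  show maxSumOfSquares 1 (-5) = "-5"
  unfold maxSumOfSquares
  rw [if_neg (by norm_num), pvALoopNeg (-5) (by norm_num) []]
  decide

theorem maxSumOfSquares_tight : Claim_exact_maxSumOfSquares := by
  intro num sum _ hd
  unfold D_maxSumOfSquares at hd
  obtain ⟨hneg, hle⟩ := hd
  have hB : maxSumOfSquares_alt num sum = "" := by
    unfold maxSumOfSquares_alt
    rw [if_pos (Or.inr hneg)]
  rw [hB]
  unfold maxSumOfSquares
  rw [if_neg (by omega), pvALoopNeg sum hneg []]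
  intro hcontra
  have h := congrArg String.toList hcontra
  simp [String.join_eq, PySem.Int.toChars, hneg] at h
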